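-- pv_equiv track=rewrite | github.com/guiceroni/ihmcervejeira | Tela com app/comandos.py | mensagem
-- ===== SOURCE A (Python) =====
-- def mensagem(cod):
-- 	if cod == "000":
-- 		return "Adicione os 30L de agua, coloque a pa e precione OK para iniciar"
-- 	if cod == "001":
-- 		return "Esquentando agua"
-- 	if cod == "002":
-- 		return "Adicione o malte e precione OK"
-- 	if cod == "003":
-- 		return "Retire a primeira panela e lave o malte, retire a pa e precione OK"
-- 	if cod == "004":
-- 		return "Etapa da fervura"
-- 	if int(cod) >= 14 and int(cod) < 100:
-- 		while int(cod) > 10: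
-- 			cod = int(cod) - 10
-- 		return ("Emulsione o lupulo " + str(int(cod) - 3))
-- 	if cod == "005":
-- 		return "Agora eh com voce, resfrie-a, adicione o fermento e coloque no fermentador"
-- 	if (int(cod) % 2) == 1:
-- 		return "Mantendo temperatura desejada"
-- 	if (int(cod) % 2) == 0:
-- 		return "Aquecendo agua"
-- ===== SOURCE B (Python) =====
-- _MSGS = {
--     "000": "Adicione os 30L de agua, coloque a pa e precione OK para iniciar",
--     "001": "Esquentando agua",
--     "002": "Adicione o malte e precione OK",
--     "003": "Retire a primeira panela e lave o malte, retire a pa e precione OK",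
--     "004": "Etapa da fervura",
--     "005": "Agora eh com voce, resfrie-a, adicione o fermento e coloque no fermentador",
-- }
--
--
-- def mensagem(cod):
--     msg = _MSGS.get(cod)
--     if msg is not None:
--         return msg
--     n = int(cod)
--     if 14 <= n < 100:
--         return "Emulsione o lupulo " + str((n - 1) % 10 - 2)
--     return "Mantendo temperatura desejada" if n % 2 else "Aquecendo agua"
-- ===== Notes on version B (the rewrite author's own statement) =====
-- stated objective: simpler
-- what changed: a message table plus closed-form modular arithmetic ((n-1)%10-2) replaces A's literal if-chain and its subtract-10 while loop; the two parity ifs collapse to one ternary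
import Mathlib
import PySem

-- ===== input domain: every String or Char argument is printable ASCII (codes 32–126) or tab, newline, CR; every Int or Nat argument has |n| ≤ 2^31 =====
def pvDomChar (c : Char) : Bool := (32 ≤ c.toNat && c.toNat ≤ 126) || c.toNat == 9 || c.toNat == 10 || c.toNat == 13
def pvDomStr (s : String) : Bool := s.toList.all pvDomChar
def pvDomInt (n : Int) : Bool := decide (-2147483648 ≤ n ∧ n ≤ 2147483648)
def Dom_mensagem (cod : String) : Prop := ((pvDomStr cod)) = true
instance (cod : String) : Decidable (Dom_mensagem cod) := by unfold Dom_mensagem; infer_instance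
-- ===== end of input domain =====

-- B replaces A's if-chain + subtract-10 while loop with a message table and the
-- closed form (n-1) % 10 - 2 (objective: simpler).

-- ===== PORT A =====
-- the 'while int(cod) > 10: cod = int(cod) - 10' loop of A
def pvWhileA (n : Int) : Int :=
  if 10 < n then pvWhileA (n - 10) else n
termination_by n.toNat
decreasing_by omega

def mensagem (cod : String) : String :=
  if cod = "000" then "Adicione os 30L de agua, coloque a pa e precione OK para iniciar"
  else if cod = "001" then "Esquentando agua"
  else if cod = "002" then "Adicione o malte e precione OK"
  else if cod = "003" then "Retire a primeira panela e lave o malte, retire a pa e precione OK"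
  else if cod = "004" then "Etapa da fervura"
  else match PySem.Int.ofStr? cod with
    | none => ""  -- int(cod) raises ValueError here; excluded by Pre_mensagem
    | some n =>
      if 14 ≤ n ∧ n < 100 then
        "Emulsione o lupulo " ++ PySem.Int.toStr (pvWhileA n - 3)
      else if cod = "005" then
        "Agora eh com voce, resfrie-a, adicione o fermento e coloque no fermentador"
      else if PySem.Int.mod n 2 = 1 then "Mantendo temperatura desejada"
      else if PySem.Int.mod n 2 = 0 then "Aquecendo agua"
      else ""  -- unreachable (Python would return None)

-- ===== PORT B =====
def pvTable : PySem.Dict String String := PySem.Dict.ofList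
  [("000", "Adicione os 30L de agua, coloque a pa e precione OK para iniciar"),
   ("001", "Esquentando agua"),
   ("002", "Adicione o malte e precione OK"),
   ("003", "Retire a primeira panela e lave o malte, retire a pa e precione OK"),
   ("004", "Etapa da fervura"),
   ("005", "Agora eh com voce, resfrie-a, adicione o fermento e coloque no fermentador")]

def mensagem_alt (cod : String) : String :=
  match PySem.Dict.get? pvTable cod with
  | some msg => msg
  | none =>
    match PySem.Int.ofStr? cod with
    | none => ""  -- int(cod) raises ValueError here; excluded by Pre_mensagem
    | some n =>
      if 14 ≤ n ∧ n < 100 then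
        "Emulsione o lupulo " ++ PySem.Int.toStr (PySem.Int.mod (n - 1) 10 - 2)
      else if PySem.Int.mod n 2 ≠ 0 then "Mantendo temperatura desejada"
      else "Aquecendo agua"

-- ===== PRECONDITION & SPEC =====
-- Pre_ excludes exactly the strings on which int(cod) raises ValueError (both A and B raise there).
def Pre_mensagem (cod : String) : Prop := (PySem.Int.ofStr? cod).isSome = true
instance (cod : String) : Decidable (Pre_mensagem cod) := by unfold Pre_mensagem; infer_instance

def pvWitness_mensagem : String := "17"

def Spec_mensagem (cod : String) (out : String) : Prop := out = mensagem_alt cod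
instance (cod : String) (out : String) : Decidable (Spec_mensagem cod out) := by unfold Spec_mensagem; infer_instance

-- ===== CLAIM (what is proved, stated in full; the proofs are below) =====
def Claim_equal_mensagem : Prop := ∀ (cod : String), Dom_mensagem cod → Pre_mensagem cod → Spec_mensagem cod (mensagem cod)

-- ===== LEMMAS AND PROOFS =====

lemma pvWhileA_closed_aux : ∀ (k : Nat) (n : Int), n.toNat ≤ k → 0 < n →
    pvWhileA n = PySem.Int.mod (n - 1) 10 + 1 := by
  intro k
  induction k with
  | zero => intro n hk hn; omega
  | succ k ih =>
    intro n hk hn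
    rw [pvWhileA]
    split_ifs with h
    · rw [ih (n - 10) (by omega) (by omega)]
      rw [PySem.Int.mod_eq_emod_of_pos (by norm_num), PySem.Int.mod_eq_emod_of_pos (by norm_num)]
      omega
    · rw [PySem.Int.mod_eq_emod_of_pos (by norm_num)]
      omega

lemma pvWhileA_closed (n : Int) (hn : 0 < n) :
    pvWhileA n = PySem.Int.mod (n - 1) 10 + 1 :=
  pvWhileA_closed_aux n.toNat n le_rfl hn

-- ===== VERDICT (by name: the statement is the Claim_ definition above) =====
theorem mensagem_spec : Claim_equal_mensagem := by
  intro cod _ hpre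
  unfold Spec_mensagem mensagem mensagem_alt
  by_cases h0 : cod = "000"; · subst h0; decide
  by_cases h1 : cod = "001"; · subst h1; decide
  by_cases h2 : cod = "002"; · subst h2; decide
  by_cases h3 : cod = "003"; · subst h3; decide
  by_cases h4 : cod = "004"; · subst h4; decide
  by_cases h5 : cod = "005"; · subst h5; decide
  obtain ⟨n, hn⟩ := Option.isSome_iff_exists.mp hpre
  have htab : PySem.Dict.get? pvTable cod = none := by
    rw [PySem.Dict.get?_eq_none_iff_not_mem_keys]
    have hk : PySem.Dict.keys pvTable = ["000", "001", "002", "003", "004", "005"] := by decide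
    rw [hk]
    simp [h0, h1, h2, h3, h4, h5]
  simp only [if_neg h0, if_neg h1, if_neg h2, if_neg h3, if_neg h4, htab, hn]
  by_cases hr : 14 ≤ n ∧ n < 100
  · simp only [if_pos hr]
    rw [pvWhileA_closed n (by omega)]
    congr 2
    simp only [PySem.Int.mod_eq_emod_of_pos (show (0:Int) < 10 by norm_num)]
    omega
  · simp only [if_neg hr, if_neg h5,
      PySem.Int.mod_eq_emod_of_pos (show (0:Int) < 2 by norm_num)]
    split_ifs <;> first | rfl | omega
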